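-- pv_equiv track=rewrite | github.com/cirosantilli/project-euler-solvers | solvers/526.py | build_wheel_residues
-- ===== SOURCE A (Python) =====
-- def egcd(a: int, b: int):
--     """Extended GCD: returns (g, x, y) with a*x + b*y = g = gcd(a,b)."""
--     x0, x1 = 1, 0
--     y0, y1 = 0, 1
--     while b:
--         q = a // b
--         a, b = b, a - q * b
--         x0, x1 = x1, x0 - q * x1
--         y0, y1 = y1, y0 - q * y1
--     return a, x0, y0
--
-- def inv_mod(a: int, m: int) -> int:
--     """Modular inverse of a modulo m (assuming gcd(a,m)=1)."""
--     g, x, _ = egcd(a % m, m)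
--     if g != 1:
--         raise ValueError("inverse does not exist")
--     return x % m
--
-- def _forbidden_residues(polys, p: int):
--     """
--     For a polynomial a*t+b, the residue r = -b * inv(a) (mod p) makes it divisible by p.
--     Return the set of forbidden residues modulo p across all polys.
--     """
--     forb = set()
--     for a, b in polys:
--         if a % p == 0:
--             # then a*t+b ≡ b (mod p); if b≡0 then it's always divisible -> impossible for primes
--             if b % p == 0:
--                 return None
--             continue
--         inva = inv_mod(a, p)
--         forb.add((-b * inva) % p)
--     return forb
--
-- def build_wheel_residues(polys, wheel_primes):
--     """
--     Build all residues r (mod M) that avoid divisibility by wheel_primes for ALL polynomials.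
--     Uses iterative CRT; M is product of wheel_primes.
--     """
--     residues = [0]
--     mod = 1
--     for p in wheel_primes:
--         forb = _forbidden_residues(polys, p)
--         if forb is None:
--             return [], 0
--         allowed = [x for x in range(p) if x not in forb]
--
--         inv = inv_mod(mod, p)  # mod and p are coprime
--         new_residues = []
--         for r in residues:
--             r_mod_p = r % p
--             for a in allowed:
--                 k = ((a - r_mod_p) * inv) % p
--                 new_residues.append(r + mod * k)
--         mod *= p
--         residues = new_residues
--
--     residues.sort()
--     return residues, mod
-- ===== SOURCE B (Python) =====
-- def egcd(a: int, b: int):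
--     """Extended GCD: returns (g, x, y) with a*x + b*y = g = gcd(a,b)."""
--     x0, x1 = 1, 0
--     y0, y1 = 0, 1
--     while b:
--         q = a // b
--         a, b = b, a - q * b
--         x0, x1 = x1, x0 - q * x1
--         y0, y1 = y1, y0 - q * y1
--     return a, x0, y0
--
-- def inv_mod(a: int, m: int) -> int:
--     """Modular inverse of a modulo m (assuming gcd(a,m)=1)."""
--     g, x, _ = egcd(a % m, m)
--     if g != 1:
--         raise ValueError("inverse does not exist")
--     return x % m
--
-- def build_wheel_residues(polys, wheel_primes):
--     """
--     Direct CRT: per-prime allowed residues by root testing, one CRT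
--     coefficient per prime, then every combination as a coefficient sum.
--     """
--     tables = []
--     for p in wheel_primes:
--         if any(a % p == 0 and b % p == 0 for a, b in polys):
--             return [], 0
--         tables.append((p, [x for x in range(p)
--                            if all((a * x + b) % p != 0 for a, b in polys)]))
--     mod = 1
--     for p in wheel_primes:
--         mod *= p
--     sums = [0]
--     for p, allowed in tables:
--         m = mod // p
--         c = m * inv_mod(m, p)
--         sums = [s + a * c for s in sums for a in allowed]
--     return sorted(s % mod for s in sums), mod
-- ===== Notes on version B (the rewrite author's own statement) =====
-- stated objective: alternative
-- what changed: A interleaves CRT lifting with the prime loop (rebuilding the whole residue list at each prime with an inverse of the running prefix product, and computing forbidden residues via modular inverses); B instead finds each prime's allowed residues by direct root testing, precomputes one CRT coefficient per prime from the full modulus, and enumerates every combination as a plain coefficient sum reduced mod M.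
import Mathlib
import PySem

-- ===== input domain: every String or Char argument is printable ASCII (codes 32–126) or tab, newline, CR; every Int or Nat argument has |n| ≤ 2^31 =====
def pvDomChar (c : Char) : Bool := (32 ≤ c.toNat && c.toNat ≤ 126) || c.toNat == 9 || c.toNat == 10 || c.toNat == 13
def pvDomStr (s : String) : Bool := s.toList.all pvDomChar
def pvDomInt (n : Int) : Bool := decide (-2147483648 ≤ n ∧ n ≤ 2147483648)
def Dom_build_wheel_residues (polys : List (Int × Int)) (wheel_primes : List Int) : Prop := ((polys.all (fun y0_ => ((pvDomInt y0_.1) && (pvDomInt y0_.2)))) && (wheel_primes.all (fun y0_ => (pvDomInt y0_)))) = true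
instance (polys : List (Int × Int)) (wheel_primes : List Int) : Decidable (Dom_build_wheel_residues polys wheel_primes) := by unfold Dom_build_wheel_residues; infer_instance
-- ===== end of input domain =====

-- B replaces A's interleaved CRT lifting (which rebuilds the residue list at every
-- prime, with an inverse of the running prefix product) by a direct construction:
-- per-prime allowed residues found by root testing (no modular inverse there), one
-- CRT coefficient per prime from the full modulus, and every combination obtained
-- as a plain coefficient sum reduced mod M.  Objective: alternative (same cost).

-- ===== PORT A =====
-- helper: Python's egcd while-loop
def egcdLoop (a b x0 x1 y0 y1 : Int) : Int × Int × Int :=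
  if hb : b = 0 then (a, x0, y0)
  else
    let q := PySem.Int.floordiv a b
    egcdLoop b (a - q * b) x1 (x0 - q * x1) y1 (y0 - q * y1)
termination_by b.natAbs
decreasing_by
  have h := PySem.Int.floordiv_mul_add_mod a b
  rcases lt_trichotomy b 0 with hlt | heq | hgt
  · have := PySem.Int.mod_neg_bounds a hlt
    omega
  · exact absurd heq hb
  · have h1 := PySem.Int.mod_nonneg a hgt
    have h2 := PySem.Int.mod_lt a hgt
    omega

def egcd (a b : Int) : Int × Int × Int := egcdLoop a b 1 0 0 1

-- helper: inv_mod; none = Python's ValueError "inverse does not exist"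
def inv_mod? (a m : Int) : Option Int :=
  match egcd (PySem.Int.mod a m) m with
  | (g, x, _) => if g = 1 then some (PySem.Int.mod x m) else none

-- helper: _forbidden_residues, threaded over polys.
-- outer none = an exception escaped (ValueError; excluded by Pre_);
-- inner none = Python's explicit 'return None'.
def forbLoop (polys : List (Int × Int)) (p : Int) (forb : PySem.Set Int) :
    Option (Option (PySem.Set Int)) :=
  match polys with
  | [] => some (some forb)
  | (a, b) :: rest =>
    if PySem.Int.mod a p = 0 then
      if PySem.Int.mod b p = 0 then some none
      else forbLoop rest p forb
    else
      match inv_mod? a p with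
      | none => none
      | some inva => forbLoop rest p (PySem.Set.add forb (PySem.Int.mod (-b * inva) p))

-- A's main loop over wheel_primes, carrying (residues, mod).
-- outer none = exception (excluded by Pre_); inner none = 'return [], 0'.
def aLoop (polys : List (Int × Int)) (ps : List Int) (residues : List Int) (mod : Int) :
    Option (Option (List Int × Int)) :=
  match ps with
  | [] => some (some (residues, mod))
  | p :: rest =>
    match forbLoop polys p PySem.Set.empty with
    | none => none
    | some none => some none
    | some (some forb) =>
      let allowed := (PySem.List.pyRange 0 p 1).filter (fun x => !(PySem.Set.contains forb x))
      match inv_mod? mod p with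
      | none => none
      | some inv =>
        let new := residues.foldl (fun acc r =>
          acc ++ allowed.map (fun a =>
            r + mod * (PySem.Int.mod ((a - PySem.Int.mod r p) * inv) p))) []
        aLoop polys rest new (mod * p)

def build_wheel_residues (polys : List (Int × Int)) (wheel_primes : List Int) : List Int × Int :=
  match aLoop polys wheel_primes [0] 1 with
  | none => ([], 0)            -- exception path, never reached under Pre_
  | some none => ([], 0)
  | some (some (rs, m)) => (PySem.List.sorted rs (fun x => x) false, m)

-- ===== PORT B =====
-- B phase 1: per-prime allowed residues by direct root testing.
-- none = the 'return [], 0' of the any(..)-check.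
def allowedOf (polys : List (Int × Int)) (p : Int) : List Int :=
  (PySem.List.pyRange 0 p 1).filter
    (fun x => polys.all (fun ab => !(PySem.Int.mod (ab.1 * x + ab.2) p == 0)))

def tablesLoop (polys : List (Int × Int)) (ps : List Int) :
    Option (List (Int × List Int)) :=
  match ps with
  | [] => some []
  | p :: rest =>
    if polys.any (fun ab => PySem.Int.mod ab.1 p == 0 && PySem.Int.mod ab.2 p == 0) then
      none
    else
      match tablesLoop polys rest with
      | none => none
      | some ts => some ((p, allowedOf polys p) :: ts)

-- B phase 2: one CRT coefficient per prime, sums of coefficients.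
-- none = ValueError from inv_mod (never reached under Pre_).
def sumsLoop (mod : Int) (ts : List (Int × List Int)) (sums : List Int) : Option (List Int) :=
  match ts with
  | [] => some sums
  | (p, allowed) :: rest =>
    let m := PySem.Int.floordiv mod p
    match inv_mod? m p with
    | none => none
    | some i =>
      sumsLoop mod rest (sums.flatMap (fun s => allowed.map (fun a => s + a * (m * i))))

def build_wheel_residues_alt (polys : List (Int × Int)) (wheel_primes : List Int) :
    List Int × Int :=
  match tablesLoop polys wheel_primes with
  | none => ([], 0)
  | some ts =>
    let mod := wheel_primes.foldl (· * ·) 1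
    match sumsLoop mod ts [0] with
    | none => ([], 0)          -- exception path, never reached under Pre_
    | some sums =>
      (PySem.List.sorted (sums.map (fun s => PySem.Int.mod s mod)) (fun x => x) false, mod)

-- ===== PRECONDITION & SPEC =====
-- Pre_ holds exactly where the Python A returns normally (it excludes the inputs on which
-- A raises ValueError/ZeroDivisionError): either every wheel prime is ≥ 1, pairwise
-- coprime and coprime to each leading coefficient it does not divide (A runs to the end),
-- or some processable prefix of that shape is followed by an entry that divides both
-- coefficients of a reachable polynomial, triggering the early ([], 0) return.
def Pre_build_wheel_residues (polys : List (Int × Int)) (wheel_primes : List Int) : Prop :=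
  ((∀ q ∈ wheel_primes, 1 ≤ q ∧ ∀ ab ∈ polys, ¬ q ∣ ab.1 → Int.gcd ab.1 q = 1) ∧
    wheel_primes.Pairwise (fun x y => Int.gcd x y = 1)) ∨
  (∃ k < wheel_primes.length,
    (∀ q ∈ wheel_primes.take k, 1 ≤ q ∧ ∀ ab ∈ polys, ¬ q ∣ ab.1 → Int.gcd ab.1 q = 1) ∧
    (wheel_primes.take k).Pairwise (fun x y => Int.gcd x y = 1) ∧
    wheel_primes.getD k 0 ≠ 0 ∧
    ∃ j < polys.length,
      (wheel_primes.getD k 0 ∣ (polys.getD j (0, 0)).1 ∧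
       wheel_primes.getD k 0 ∣ (polys.getD j (0, 0)).2) ∧
      ∀ ab ∈ polys.take j,
        (wheel_primes.getD k 0 ∣ ab.1 ∨
         (1 ≤ wheel_primes.getD k 0 ∧ Int.gcd ab.1 (wheel_primes.getD k 0) = 1)))
instance (polys : List (Int × Int)) (wheel_primes : List Int) : Decidable (Pre_build_wheel_residues polys wheel_primes) := by unfold Pre_build_wheel_residues; infer_instance

def pvWitness_build_wheel_residues : (List (Int × Int)) × List Int := ([(1, 0)], [2, 3])

def Spec_build_wheel_residues (polys : List (Int × Int)) (wheel_primes : List Int) (out : List Int × Int) : Prop := out = build_wheel_residues_alt polys wheel_primes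
instance (polys : List (Int × Int)) (wheel_primes : List Int) (out : List Int × Int) : Decidable (Spec_build_wheel_residues polys wheel_primes out) := by unfold Spec_build_wheel_residues; infer_instance

-- ===== CLAIM (what is proved, stated in full; the proofs are below) =====
def Claim_equal_build_wheel_residues : Prop := ∀ (polys : List (Int × Int)) (wheel_primes : List Int), Dom_build_wheel_residues polys wheel_primes → Pre_build_wheel_residues polys wheel_primes → Spec_build_wheel_residues polys wheel_primes (build_wheel_residues polys wheel_primes)

-- ===== LEMMAS AND PROOFS =====

-- Bezout invariant of the egcd loop
theorem egcdLoop_bezout (A B : Int) : ∀ (a b x0 x1 y0 y1 : Int),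
    A * x0 + B * y0 = a → A * x1 + B * y1 = b →
    A * (egcdLoop a b x0 x1 y0 y1).2.1 + B * (egcdLoop a b x0 x1 y0 y1).2.2 =
      (egcdLoop a b x0 x1 y0 y1).1 := by
  intro a b x0 x1 y0 y1
  induction a, b, x0, x1, y0, y1 using egcdLoop.induct with
  | case1 a x0 x1 y0 y1 =>
    intro h0 h1
    rw [egcdLoop]
    simpa using h0
  | case2 a b x0 x1 y0 y1 hb q ih =>
    intro h0 h1
    rw [egcdLoop]
    simp only [hb, dite_false]
    exact ih h1 (by rw [← h0, ← h1]; ring)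

-- the egcd loop computes the gcd of nonnegative inputs
theorem gcd_emod_left_arg (a b : Int) : Int.gcd (a % b) b = Int.gcd a b := by
  rw [Int.gcd_comm, show a % b = a + -(a / b) * b by rw [Int.emod_def]; ring,
    Int.gcd_add_mul_right_right, Int.gcd_comm]

theorem egcdLoop_gcd : ∀ (a b x0 x1 y0 y1 : Int), 0 ≤ a → 0 ≤ b →
    (egcdLoop a b x0 x1 y0 y1).1 = (Int.gcd a b : Int) := by
  intro a b x0 x1 y0 y1
  induction a, b, x0, x1, y0, y1 using egcdLoop.induct with
  | case1 a x0 x1 y0 y1 =>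
    intro ha _
    rw [egcdLoop]
    simp [Int.natAbs_of_nonneg ha]
  | case2 a b x0 x1 y0 y1 hb q ih =>
    intro _ hb0
    have hbpos : 0 < b := lt_of_le_of_ne hb0 (Ne.symm hb)
    have hq : PySem.Int.floordiv a b = a / b := PySem.Int.floordiv_eq_ediv_of_pos hbpos
    have hrem : a - PySem.Int.floordiv a b * b = a % b := by rw [hq, Int.emod_def]; ring
    have hrnn : 0 ≤ a - PySem.Int.floordiv a b * b := by
      rw [hrem]; exact Int.emod_nonneg a (by omega)
    rw [egcdLoop]
    simp only [hb, dite_false]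
    rw [ih hb0 hrnn, hrem, Int.gcd_comm b (a % b), gcd_emod_left_arg, Int.gcd_comm]

-- inv_mod succeeds on coprime arguments and returns a modular inverse in [0, m)
theorem inv_mod_ok (a m : Int) (hm : 1 ≤ m) (h : Int.gcd a m = 1) :
    ∃ i, inv_mod? a m = some i ∧ 0 ≤ i ∧ i < m ∧ a * i ≡ 1 [ZMOD m] := by
  have hm0 : (0 : Int) < m := hm
  have hmod : PySem.Int.mod a m = a % m := PySem.Int.mod_eq_emod_of_pos hm0
  have hge : 0 ≤ a % m := Int.emod_nonneg a (by omega)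
  have hgcd : Int.gcd (a % m) m = 1 := by rw [gcd_emod_left_arg]; exact h
  have hfst : (egcd (a % m) m).1 = ((Int.gcd (a % m) m : Nat) : Int) :=
    egcdLoop_gcd (a % m) m 1 0 0 1 hge (by omega)
  have hbez : (a % m) * (egcd (a % m) m).2.1 + m * (egcd (a % m) m).2.2 =
      (egcd (a % m) m).1 :=
    egcdLoop_bezout (a % m) m (a % m) m 1 0 0 1 (by ring) (by ring)
  rcases he : egcd (a % m) m with ⟨g, x, y⟩
  rw [he] at hfst hbez
  simp only [hgcd] at hfst
  refine ⟨PySem.Int.mod x m, ?_, ?_, ?_, ?_⟩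
  · unfold inv_mod?
    rw [hmod, he]
    simp [hfst]
  · rw [PySem.Int.mod_eq_emod_of_pos hm0]
    exact Int.emod_nonneg x (by omega)
  · rw [PySem.Int.mod_eq_emod_of_pos hm0]
    exact Int.emod_lt_of_pos x hm0
  · rw [PySem.Int.mod_eq_emod_of_pos hm0]
    have h1 : a * (x % m) ≡ a * x [ZMOD m] :=
      Int.ModEq.mul_left a (Int.emod_emod_of_dvd x dvd_rfl)
    have h2 : a * x ≡ (a % m) * x [ZMOD m] :=
      Int.ModEq.mul_right x (Int.emod_emod_of_dvd a dvd_rfl).symm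
    have h3 : (a % m) * x ≡ 1 [ZMOD m] := by
      have hbez' : a % m * x + m * y = 1 := by simp [hfst] at hbez; linarith
      have hxy : (a % m) * x = 1 - m * y := by linarith
      rw [hxy]
      exact (Int.modEq_iff_dvd.mpr (by simpa using dvd_mul_right m y)).symm
    exact (h1.trans h2).trans h3

theorem gcd_mul_left_one (m n p : Int) (h1 : Int.gcd m p = 1) (h2 : Int.gcd n p = 1) :
    Int.gcd (m * n) p = 1 := by
  rw [← Int.isCoprime_iff_gcd_eq_one] at h1 h2 ⊢
  exact h1.mul_left h2

theorem gcd_prod_one (p : Int) : ∀ (qs : List Int), (∀ q ∈ qs, Int.gcd q p = 1) →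
    Int.gcd qs.prod p = 1 := by
  intro qs
  induction qs with
  | nil => intro _; simp [Int.gcd]
  | cons q rest ih =>
    intro h
    rw [List.prod_cons]
    exact gcd_mul_left_one q rest.prod p (h q (List.mem_cons_self))
      (ih fun x hx => h x (List.mem_cons_of_mem _ hx))

-- uniqueness of a residue modulo a product of two coprime moduli
theorem crt_uniq (m p x y : Int) (_hm : 0 < m) (_hp : 0 < p) (hco : Int.gcd m p = 1)
    (hx0 : 0 ≤ x) (hx1 : x < m * p) (hy0 : 0 ≤ y) (hy1 : y < m * p)
    (h1 : x ≡ y [ZMOD m]) (h2 : x ≡ y [ZMOD p]) : x = y := by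
  have d1 : m ∣ y - x := Int.ModEq.dvd h1
  have d2 : p ∣ y - x := Int.ModEq.dvd h2
  have hco' : IsCoprime m p := Int.isCoprime_iff_gcd_eq_one.mpr hco
  have d3 : m * p ∣ y - x := hco'.mul_dvd d1 d2
  have habs : |y - x| < m * p := abs_lt.mpr ⟨by omega, by omega⟩
  have := Int.eq_zero_of_abs_lt_dvd d3 habs
  omega

-- a root x of a*t+b mod p is exactly A's forbidden residue (-b * inv a) % p
theorem root_iff (a b i p x : Int) (hp : 1 ≤ p) (hi : a * i ≡ 1 [ZMOD p])
    (hx0 : 0 ≤ x) (hx1 : x < p) :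
    x = PySem.Int.mod (-b * i) p ↔ PySem.Int.mod (a * x + b) p = 0 := by
  have hp0 : (0 : Int) < p := hp
  simp only [PySem.Int.mod_eq_emod_of_pos hp0]
  constructor
  · intro hx
    subst hx
    have h1 : a * (-b * i % p) + b ≡ a * (-b * i) + b [ZMOD p] :=
      (Int.ModEq.mul_left a (Int.emod_emod_of_dvd _ dvd_rfl)).add_right b
    have h2 : a * (-b * i) + b = -b * (a * i) + b := by ring
    have h3 : -b * (a * i) + b ≡ -b * 1 + b [ZMOD p] := (hi.mul_left (-b)).add_right b
    have h4 : a * (-b * i % p) + b ≡ 0 [ZMOD p] := by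
      calc a * (-b * i % p) + b ≡ a * (-b * i) + b [ZMOD p] := h1
        _ = -b * (a * i) + b := h2
        _ ≡ -b * 1 + b [ZMOD p] := h3
        _ = 0 := by ring
    have h5 : (a * (-b * i % p) + b) % p = 0 % p := h4
    rw [Int.zero_emod] at h5
    exact h5
  · intro hr
    have hdvd : p ∣ a * x + b := Int.dvd_of_emod_eq_zero hr
    have h1 : x ≡ x * (a * i) [ZMOD p] := by
      have := hi.mul_left x
      simpa using this.symm
    have h2 : x * (a * i) = i * (a * x + b) - b * i := by ring
    have h3 : i * (a * x + b) ≡ 0 [ZMOD p] :=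
      (Int.modEq_zero_iff_dvd).mpr (Dvd.dvd.mul_left hdvd i)
    have h4 : x ≡ -b * i [ZMOD p] := by
      calc x ≡ x * (a * i) [ZMOD p] := h1
        _ = i * (a * x + b) - b * i := h2
        _ ≡ 0 - b * i [ZMOD p] := h3.sub_right (b * i)
        _ = -b * i := by ring
    have : x % p = -b * i % p := h4
    rw [← this, Int.emod_eq_of_lt hx0 hx1]

-- forbLoop returns Python's 'None' when a doubly divisible polynomial is reachable
theorem forbLoop_exit (p : Int) : ∀ (polys : List (Int × Int)) (j : Nat) (f0 : PySem.Set Int),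
    j < polys.length →
    (p ∣ (polys.getD j (0, 0)).1 ∧ p ∣ (polys.getD j (0, 0)).2) →
    (∀ ab ∈ polys.take j, p ∣ ab.1 ∨ (1 ≤ p ∧ Int.gcd ab.1 p = 1)) →
    forbLoop polys p f0 = some none := by
  intro polys
  induction polys with
  | nil => intro j f0 hj _ _; simp at hj
  | cons ab rest ih =>
    intro j f0 hj hdd hpre
    obtain ⟨a, b⟩ := ab
    cases j with
    | zero =>
      simp only [List.getD_cons_zero] at hdd
      rw [forbLoop]
      rw [if_pos (PySem.Int.mod_eq_zero_iff_dvd a p |>.mpr hdd.1),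
        if_pos (PySem.Int.mod_eq_zero_iff_dvd b p |>.mpr hdd.2)]
    | succ j =>
      simp only [List.getD_cons_succ] at hdd
      have hj' : j < rest.length := by simpa using hj
      have hpre' : ∀ ab ∈ rest.take j, p ∣ ab.1 ∨ (1 ≤ p ∧ Int.gcd ab.1 p = 1) := by
        intro ab' hab'
        exact hpre ab' (by simp [List.take_succ_cons]; right; exact hab')
      rw [forbLoop]
      by_cases hpa : p ∣ a
      · rw [if_pos (PySem.Int.mod_eq_zero_iff_dvd a p |>.mpr hpa)]
        by_cases hpb : p ∣ b
        · rw [if_pos (PySem.Int.mod_eq_zero_iff_dvd b p |>.mpr hpb)]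
        · rw [if_neg (fun hc => hpb ((PySem.Int.mod_eq_zero_iff_dvd b p).mp hc))]
          exact ih j f0 hj' hdd hpre'
      · rw [if_neg (fun hc => hpa ((PySem.Int.mod_eq_zero_iff_dvd a p).mp hc))]
        have hhead := hpre (a, b) (by simp [List.take_succ_cons])
        rcases hhead with h | ⟨hp1, hg⟩
        · exact absurd h hpa
        · obtain ⟨i, hi, _, _, _⟩ := inv_mod_ok a p hp1 hg
          rw [hi]
          exact ih j _ hj' hdd hpre'

-- forbLoop succeeds when no polynomial is doubly divisible, and its set holds
-- exactly the residues where some polynomial vanishes mod p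
theorem forbLoop_ok (p : Int) (hp : 1 ≤ p) : ∀ (polys : List (Int × Int)) (f0 : PySem.Set Int),
    (∀ ab ∈ polys, ¬ p ∣ ab.1 → Int.gcd ab.1 p = 1) →
    (∀ ab ∈ polys, ¬ (p ∣ ab.1 ∧ p ∣ ab.2)) →
    ∃ f, forbLoop polys p f0 = some (some f) ∧ ∀ x, 0 ≤ x → x < p →
      (PySem.Set.contains f x = true ↔
        (PySem.Set.contains f0 x = true ∨
          ∃ ab ∈ polys, PySem.Int.mod (ab.1 * x + ab.2) p = 0)) := by
  have hp0 : (0 : Int) < p := hp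
  intro polys
  induction polys with
  | nil =>
    intro f0 _ _
    exact ⟨f0, rfl, by simp⟩
  | cons ab rest ih =>
    intro f0 hinv hndd
    obtain ⟨a, b⟩ := ab
    have hinv' : ∀ ab ∈ rest, ¬ p ∣ ab.1 → Int.gcd ab.1 p = 1 :=
      fun ab hab => hinv ab (List.mem_cons_of_mem _ hab)
    have hndd' : ∀ ab ∈ rest, ¬ (p ∣ ab.1 ∧ p ∣ ab.2) :=
      fun ab hab => hndd ab (List.mem_cons_of_mem _ hab)
    rw [forbLoop]
    by_cases hpa : p ∣ a
    · have hpb : ¬ p ∣ b := fun hb => hndd (a, b) (List.mem_cons_self) ⟨hpa, hb⟩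
      rw [if_pos (PySem.Int.mod_eq_zero_iff_dvd a p |>.mpr hpa),
        if_neg (fun hc => hpb ((PySem.Int.mod_eq_zero_iff_dvd b p).mp hc))]
      obtain ⟨f, hf, hchar⟩ := ih f0 hinv' hndd'
      refine ⟨f, hf, fun x hx0 hx1 => ?_⟩
      rw [hchar x hx0 hx1]
      have hhead : ¬ PySem.Int.mod (a * x + b) p = 0 := by
        rw [PySem.Int.mod_eq_zero_iff_dvd]
        intro hd
        apply hpb
        have : b = (a * x + b) - a * x := by ring
        rw [this]
        exact dvd_sub hd (Dvd.dvd.mul_right hpa x)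
      simp only [List.mem_cons]
      constructor
      · rintro (h | ⟨ab', hab', hr⟩)
        · exact Or.inl h
        · exact Or.inr ⟨ab', Or.inr hab', hr⟩
      · rintro (h | ⟨ab', hab' | hab', hr⟩)
        · exact Or.inl h
        · rw [hab'] at hr; exact absurd hr hhead
        · exact Or.inr ⟨ab', hab', hr⟩
    · have hg : Int.gcd a p = 1 := hinv (a, b) (List.mem_cons_self) hpa
      obtain ⟨i, hi, _, _, him⟩ := inv_mod_ok a p hp hg
      rw [if_neg (fun hc => hpa ((PySem.Int.mod_eq_zero_iff_dvd a p).mp hc)), hi]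
      obtain ⟨f, hf, hchar⟩ :=
        ih (PySem.Set.add f0 (PySem.Int.mod (-b * i) p)) hinv' hndd'
      refine ⟨f, hf, fun x hx0 hx1 => ?_⟩
      rw [hchar x hx0 hx1]
      have hadd : PySem.Set.contains (PySem.Set.add f0 (PySem.Int.mod (-b * i) p)) x = true ↔
          (PySem.Set.contains f0 x = true ∨ x = PySem.Int.mod (-b * i) p) := by
        rw [PySem.Set.contains_iff, PySem.Set.mem_add, ← PySem.Set.contains_iff]
      rw [hadd, root_iff a b i p x hp him hx0 hx1]
      simp only [List.mem_cons]
      constructor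
      · rintro ((h | hr) | ⟨ab', hab', hr⟩)
        · exact Or.inl h
        · exact Or.inr ⟨(a, b), Or.inl rfl, hr⟩
        · exact Or.inr ⟨ab', Or.inr hab', hr⟩
      · rintro (h | ⟨ab', hab' | hab', hr⟩)
        · exact Or.inl (Or.inl h)
        · rw [hab'] at hr; exact Or.inl (Or.inr hr)
        · exact Or.inr ⟨ab', hab', hr⟩

-- A's filtered range equals B's allowed list
theorem allowed_eq (polys : List (Int × Int)) (p : Int) (f : PySem.Set Int)
    (hf : ∀ x, 0 ≤ x → x < p →
      (PySem.Set.contains f x = true ↔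
        (PySem.Set.contains (PySem.Set.empty (α := Int)) x = true ∨
          ∃ ab ∈ polys, PySem.Int.mod (ab.1 * x + ab.2) p = 0))) :
    (PySem.List.pyRange 0 p 1).filter (fun x => !(PySem.Set.contains f x)) =
      allowedOf polys p := by
  unfold allowedOf
  apply List.filter_congr
  intro x hx
  obtain ⟨hx0, hx1⟩ := PySem.List.mem_pyRange_one.mp hx
  have hf' := hf x hx0 hx1
  have hempty : PySem.Set.contains (PySem.Set.empty (α := Int)) x = false := by
    simp [PySem.Set.empty]
  rw [hempty] at hf'
  simp only [Bool.false_eq_true, false_or] at hf'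
  cases hcf : PySem.Set.contains f x
  · rw [hcf] at hf'
    simp only [Bool.not_false]
    symm
    rw [List.all_eq_true]
    intro ab hab
    simp only [Bool.not_eq_eq_eq_not, Bool.not_true, beq_eq_false_iff_ne, ne_eq]
    intro hr
    have hne : ¬ ∃ ab ∈ polys, PySem.Int.mod (ab.1 * x + ab.2) p = 0 :=
      fun hx => by simpa using hf'.mpr hx
    exact hne ⟨ab, hab, hr⟩
  · rw [hcf] at hf'
    obtain ⟨ab, hab, hr⟩ := hf'.mp rfl
    simp only [Bool.not_true]
    symm
    rw [List.all_eq_false]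
    refine ⟨ab, hab, ?_⟩
    simp [hr]

-- Forall₂ helpers
theorem forall₂_append {α β : Type} (S : α → β → Prop) :
    ∀ (l₁ : List α) (l₂ : List β) (u₁ : List α) (u₂ : List β),
    List.Forall₂ S l₁ l₂ → List.Forall₂ S u₁ u₂ →
    List.Forall₂ S (l₁ ++ u₁) (l₂ ++ u₂) := by
  intro l₁ l₂ u₁ u₂ h1 h2
  induction h1 with
  | nil => simpa using h2
  | cons hx _ ih => exact List.Forall₂.cons hx ih

theorem forall₂_flatMap {α β : Type} (R S : α → β → Prop) (g : α → List α) (h : β → List β) :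
    ∀ (rs : List α) (ss : List β), List.Forall₂ R rs ss →
    (∀ r s, R r s → List.Forall₂ S (g r) (h s)) →
    List.Forall₂ S (rs.flatMap g) (ss.flatMap h) := by
  intro rs ss hrel hstep
  induction hrel with
  | nil => exact List.Forall₂.nil
  | cons hr _ ih =>
    simp only [List.flatMap_cons]
    exact forall₂_append S _ _ _ _ (hstep _ _ hr) ih

theorem forall₂_map_map {α β γ : Type} (S : β → γ → Prop) (f : α → β) (g : α → γ) :
    ∀ (l : List α), (∀ a ∈ l, S (f a) (g a)) → List.Forall₂ S (l.map f) (l.map g) := by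
  intro l
  induction l with
  | nil => intro _; exact List.Forall₂.nil
  | cons a l ih =>
    intro h
    exact List.Forall₂.cons (h a (List.mem_cons_self))
      (ih fun x hx => h x (List.mem_cons_of_mem _ hx))

theorem forall₂_eq_map {α β : Type} (f : β → α) : ∀ (rs : List α) (ss : List β),
    List.Forall₂ (fun r s => r = f s) rs ss → rs = ss.map f := by
  intro rs ss hrel
  induction hrel with
  | nil => rfl
  | cons hr _ ih => simp [hr, ih]

-- the central bisimulation: A's interleaved lifting against B's coefficient sums
theorem grand (polys : List (Int × Int)) : ∀ (ps : List Int) (mod M : Int) (rs ss : List Int),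
    1 ≤ mod →
    (∀ p ∈ ps, 1 ≤ p ∧ ∀ ab ∈ polys, ¬ p ∣ ab.1 → Int.gcd ab.1 p = 1) →
    ps.Pairwise (fun x y => Int.gcd x y = 1) →
    (∀ p ∈ ps, Int.gcd mod p = 1) →
    M = mod * ps.prod →
    List.Forall₂ (fun r s => 0 ≤ r ∧ r < mod ∧ r = PySem.Int.mod s mod ∧ ∀ q ∈ ps, q ∣ s) rs ss →
    (aLoop polys ps rs mod = some none ∧ tablesLoop polys ps = none) ∨
    (∃ ts ss', tablesLoop polys ps = some ts ∧ sumsLoop M ts ss = some ss' ∧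
      aLoop polys ps rs mod = some (some (ss'.map (fun s => PySem.Int.mod s M), M))) := by
  intro ps
  induction ps with
  | nil =>
    intro mod M rs ss h1 _ _ _ hM hrel
    right
    refine ⟨[], ss, rfl, rfl, ?_⟩
    have hMm : M = mod := by simpa using hM
    have : rs = ss.map (fun s => PySem.Int.mod s M) := by
      apply forall₂_eq_map
      apply hrel.imp
      intro r s hr
      rw [hr.2.2.1, hMm]
    rw [aLoop, this, hMm]
  | cons p rest ih =>
    intro mod M rs ss h1 h2 h3 h4 hM hrel
    have hmem : p ∈ p :: rest := List.mem_cons_self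
    obtain ⟨hp1, hpinv⟩ := h2 p hmem
    have hp0 : (0 : Int) < p := hp1
    by_cases hdd : ∃ ab ∈ polys, p ∣ ab.1 ∧ p ∣ ab.2
    · left
      have hforb : forbLoop polys p PySem.Set.empty = some none := by
        obtain ⟨ab, hab, hd1, hd2⟩ := hdd
        obtain ⟨n, hn, habn⟩ := List.mem_iff_getElem.mp hab
        apply forbLoop_exit p polys n _ hn
        · rw [List.getD_eq_getElem polys (0, 0) hn, habn]
          exact ⟨hd1, hd2⟩
        · intro ab' hab'
          by_cases h : p ∣ ab'.1
          · exact Or.inl h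
          · exact Or.inr ⟨hp1, hpinv ab' (List.mem_of_mem_take hab') h⟩
      constructor
      · rw [aLoop, hforb]
      · rw [tablesLoop]
        rw [if_pos]
        rw [List.any_eq_true]
        obtain ⟨ab, hab, hd1, hd2⟩ := hdd
        refine ⟨ab, hab, ?_⟩
        simp [PySem.Int.mod_eq_zero_iff_dvd, hd1, hd2]
    · have hndd : ∀ ab ∈ polys, ¬ (p ∣ ab.1 ∧ p ∣ ab.2) := by
        intro ab hab hc
        exact hdd ⟨ab, hab, hc⟩
      obtain ⟨f, hforb, hchar⟩ := forbLoop_ok p hp1 polys PySem.Set.empty hpinv hndd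
      have hallow : (PySem.List.pyRange 0 p 1).filter (fun x => !(PySem.Set.contains f x)) =
          allowedOf polys p := allowed_eq polys p f hchar
      obtain ⟨inv, hinv, _, _, hinvmod⟩ := inv_mod_ok mod p hp1 (h4 p hmem)
      have hMp : M = p * (mod * rest.prod) := by rw [hM, List.prod_cons]; ring
      have hmfld : PySem.Int.floordiv M p = mod * rest.prod := by
        rw [PySem.Int.floordiv_eq_ediv_of_pos hp0, hMp,
          Int.mul_ediv_cancel_left _ (by omega)]
      have hrestco : ∀ q ∈ rest, Int.gcd p q = 1 := (List.pairwise_cons.mp h3).1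
      have hgcdm : Int.gcd (mod * rest.prod) p = 1 :=
        gcd_mul_left_one _ _ _ (h4 p hmem)
          (gcd_prod_one p rest (fun q hq => by rw [Int.gcd_comm]; exact hrestco q hq))
      obtain ⟨ci, hci, _, _, hcimod⟩ := inv_mod_ok (mod * rest.prod) p hp1 hgcdm
      -- the elementwise CRT step
      have hstep : ∀ r s, (0 ≤ r ∧ r < mod ∧ r = PySem.Int.mod s mod ∧ ∀ q ∈ p :: rest, q ∣ s) →
          List.Forall₂
            (fun r' s' => 0 ≤ r' ∧ r' < mod * p ∧ r' = PySem.Int.mod s' (mod * p) ∧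
              ∀ q ∈ rest, q ∣ s')
            ((allowedOf polys p).map (fun a =>
              r + mod * (PySem.Int.mod ((a - PySem.Int.mod r p) * inv) p)))
            ((allowedOf polys p).map (fun a => s + a * (mod * rest.prod * ci))) := by
        intro r s hrprop
        obtain ⟨hr0, hr1, hrs, hdvd⟩ := hrprop
        apply forall₂_map_map
        intro a _
        have hmp0 : (0 : Int) < mod * p := by positivity
        set k := PySem.Int.mod ((a - PySem.Int.mod r p) * inv) p with hk
        have hk0 : 0 ≤ k := PySem.Int.mod_nonneg _ hp0
        have hk1 : k < p := PySem.Int.mod_lt _ hp0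
        have hkemod : k = (a - r % p) * inv % p := by
          rw [hk, PySem.Int.mod_eq_emod_of_pos hp0, PySem.Int.mod_eq_emod_of_pos hp0]
        refine ⟨by positivity, ?_, ?_, ?_⟩
        · have hb : mod * k ≤ mod * (p - 1) :=
            mul_le_mul_of_nonneg_left (by omega) (by omega)
          have hb2 : mod * (p - 1) = mod * p - mod := by ring
          linarith
        · -- r' = s' mod (mod*p), by CRT uniqueness
          rw [PySem.Int.mod_eq_emod_of_pos hmp0]
          set s' := s + a * (mod * rest.prod * ci) with hs'
          set y := s' % (mod * p) with hy
          apply crt_uniq mod p _ y (by omega) hp0 (h4 p hmem)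
            (by positivity)
            (by
              have hb : mod * k ≤ mod * (p - 1) :=
                mul_le_mul_of_nonneg_left (by omega) (by omega)
              have hb2 : mod * (p - 1) = mod * p - mod := by ring
              linarith)
            (Int.emod_nonneg s' (by omega)) (Int.emod_lt_of_pos s' hmp0) ?_ ?_
          · -- congruence mod `mod`
            have hrs' : r = s % mod := by
              rw [hrs, PySem.Int.mod_eq_emod_of_pos (by omega : (0:Int) < mod)]
            have e1 : r + mod * k ≡ r [ZMOD mod] :=
              show (r + mod * k) % mod = r % mod from by rw [Int.add_mul_emod_self_left]
            have e2 : r ≡ s [ZMOD mod] :=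
              show r % mod = s % mod from by
                rw [hrs', Int.emod_emod_of_dvd s dvd_rfl]
            have e3 : s ≡ s' [ZMOD mod] :=
              Int.modEq_iff_dvd.mpr ⟨a * rest.prod * ci, by rw [hs']; ring⟩
            have e4 : s' ≡ y [ZMOD mod] :=
              show s' % mod = y % mod from by
                rw [hy, Int.emod_emod_of_dvd s' (dvd_mul_right mod p)]
            exact ((e1.trans e2).trans e3).trans e4
          · -- congruence mod p
            have f5 : r % p ≡ r [ZMOD p] := Int.emod_emod_of_dvd r dvd_rfl
            have f2 : mod * k ≡ mod * ((a - r % p) * inv) [ZMOD p] :=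
              Int.ModEq.mul_left mod
                (by rw [hkemod]; exact Int.emod_emod_of_dvd _ dvd_rfl)
            have g1 : r + mod * k ≡ a [ZMOD p] := by
              calc r + mod * k ≡ r + mod * ((a - r % p) * inv) [ZMOD p] := f2.add_left r
                _ = r + (a - r % p) * (mod * inv) := by ring
                _ ≡ r + (a - r % p) * 1 [ZMOD p] := (hinvmod.mul_left _).add_left r
                _ = a + (r - r % p) := by ring
                _ ≡ a + (r - r) [ZMOD p] := (f5.sub_left r).add_left a
                _ = a := by ring
            have hps : p ∣ s := hdvd p hmem
            have hsz : s ≡ 0 [ZMOD p] := (Int.modEq_zero_iff_dvd).mpr hps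
            have g2 : s' ≡ a [ZMOD p] := by
              calc s' = s + a * (mod * rest.prod * ci) := hs'
                _ ≡ 0 + a * (mod * rest.prod * ci) [ZMOD p] := hsz.add_right _
                _ ≡ 0 + a * 1 [ZMOD p] := (hcimod.mul_left a).add_left 0
                _ = a := by ring
            have g3 : y ≡ s' [ZMOD p] :=
              show y % p = s' % p from by
                rw [hy, Int.emod_emod_of_dvd s' (dvd_mul_left p mod)]
            exact g1.trans (g3.trans g2).symm
        · intro q hq
          apply dvd_add (hdvd q (List.mem_cons_of_mem _ hq))
          have h5 : q ∣ rest.prod := List.dvd_prod hq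
          have h6 : q ∣ mod * rest.prod * ci := Dvd.dvd.mul_right (Dvd.dvd.mul_left h5 mod) ci
          exact Dvd.dvd.mul_left h6 a
      have hrel' := forall₂_flatMap _ _ _ _ rs ss hrel hstep
      have hih := ih (mod * p) M (rs.flatMap (fun r =>
          (allowedOf polys p).map (fun a =>
            r + mod * (PySem.Int.mod ((a - PySem.Int.mod r p) * inv) p))))
        (ss.flatMap (fun s => (allowedOf polys p).map (fun a => s + a * (mod * rest.prod * ci))))
        (by nlinarith)
        (fun q hq => h2 q (List.mem_cons_of_mem _ hq))
        (List.pairwise_cons.mp h3).2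
        (fun q hq => gcd_mul_left_one _ _ _ (h4 q (List.mem_cons_of_mem _ hq)) (hrestco q hq))
        (by rw [hM, List.prod_cons]; ring)
        hrel'
      have hany : polys.any
          (fun ab => PySem.Int.mod ab.1 p == 0 && PySem.Int.mod ab.2 p == 0) = false := by
        rw [List.any_eq_false]
        intro ab hab
        simp only [Bool.and_eq_true, beq_iff_eq, not_and]
        intro ha hb
        exact hndd ab hab ⟨(PySem.Int.mod_eq_zero_iff_dvd ab.1 p).mp ha,
          (PySem.Int.mod_eq_zero_iff_dvd ab.2 p).mp hb⟩
      have hAunf : aLoop polys (p :: rest) rs mod =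
          aLoop polys rest (rs.flatMap (fun r =>
            (allowedOf polys p).map (fun a =>
              r + mod * (PySem.Int.mod ((a - PySem.Int.mod r p) * inv) p)))) (mod * p) := by
        rw [aLoop, hforb, hinv]
        simp only [hallow]
        congr 1
        rw [PySem.List.foldl_append_eq_flatMap]
        simp
      rcases hih with ⟨hA, hB⟩ | ⟨ts, ss', hB, hS, hA⟩
      · left
        constructor
        · rw [hAunf, hA]
        · rw [tablesLoop, if_neg (by rw [hany]; exact fun h => Bool.noConfusion h), hB]
      · right
        refine ⟨(p, allowedOf polys p) :: ts, ss', ?_, ?_, ?_⟩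
        · rw [tablesLoop, if_neg (by rw [hany]; exact fun h => Bool.noConfusion h), hB]
        · rw [sumsLoop]
          simp only [hmfld, hci]
          exact hS
        · rw [hAunf, hA]

-- the early-exit path: a doubly divisible polynomial stops both programs with ([], 0)
theorem exit_ind (polys : List (Int × Int)) :
    ∀ (ps : List Int) (mod : Int) (rs : List Int) (pK : Int) (rest : List Int),
    1 ≤ mod →
    (∀ q ∈ ps, 1 ≤ q ∧ ∀ ab ∈ polys, ¬ q ∣ ab.1 → Int.gcd ab.1 q = 1) →
    ps.Pairwise (fun x y => Int.gcd x y = 1) →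
    (∀ q ∈ ps, Int.gcd mod q = 1) →
    forbLoop polys pK PySem.Set.empty = some none →
    (∃ ab ∈ polys, pK ∣ ab.1 ∧ pK ∣ ab.2) →
    aLoop polys (ps ++ pK :: rest) rs mod = some none ∧
      tablesLoop polys (ps ++ pK :: rest) = none := by
  intro ps
  induction ps with
  | nil =>
    intro mod rs pK rest _ _ _ _ hforb hddK
    constructor
    · rw [List.nil_append, aLoop, hforb]
    · rw [List.nil_append, tablesLoop, if_pos]
      rw [List.any_eq_true]
      obtain ⟨ab, hab, hd1, hd2⟩ := hddK
      exact ⟨ab, hab, by simp [PySem.Int.mod_eq_zero_iff_dvd, hd1, hd2]⟩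
  | cons p ps' ih =>
    intro mod rs pK rest h1 h2 h3 h4 hforb hddK
    have hmem : p ∈ p :: ps' := List.mem_cons_self
    obtain ⟨hp1, hpinv⟩ := h2 p hmem
    rw [List.cons_append]
    by_cases hdd : ∃ ab ∈ polys, p ∣ ab.1 ∧ p ∣ ab.2
    · have hforbp : forbLoop polys p PySem.Set.empty = some none := by
        obtain ⟨ab, hab, hd1, hd2⟩ := hdd
        obtain ⟨n, hn, habn⟩ := List.mem_iff_getElem.mp hab
        apply forbLoop_exit p polys n _ hn
        · rw [List.getD_eq_getElem polys (0, 0) hn, habn]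
          exact ⟨hd1, hd2⟩
        · intro ab' hab'
          by_cases h : p ∣ ab'.1
          · exact Or.inl h
          · exact Or.inr ⟨hp1, hpinv ab' (List.mem_of_mem_take hab') h⟩
      constructor
      · rw [aLoop, hforbp]
      · rw [tablesLoop, if_pos]
        rw [List.any_eq_true]
        obtain ⟨ab, hab, hd1, hd2⟩ := hdd
        exact ⟨ab, hab, by simp [PySem.Int.mod_eq_zero_iff_dvd, hd1, hd2]⟩
    · have hndd : ∀ ab ∈ polys, ¬ (p ∣ ab.1 ∧ p ∣ ab.2) := fun ab hab hc => hdd ⟨ab, hab, hc⟩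
      obtain ⟨f, hforbp, _⟩ := forbLoop_ok p hp1 polys PySem.Set.empty hpinv hndd
      obtain ⟨inv, hinv, _, _, _⟩ := inv_mod_ok mod p hp1 (h4 p hmem)
      have hih := ih (mod * p) (rs.foldl (fun acc r =>
          acc ++ ((PySem.List.pyRange 0 p 1).filter (fun x => !(PySem.Set.contains f x))).map
            (fun a => r + mod * (PySem.Int.mod ((a - PySem.Int.mod r p) * inv) p))) [])
        pK rest (by nlinarith)
        (fun q hq => h2 q (List.mem_cons_of_mem _ hq))
        (List.pairwise_cons.mp h3).2
        (fun q hq => gcd_mul_left_one _ _ _ (h4 q (List.mem_cons_of_mem _ hq))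
          ((List.pairwise_cons.mp h3).1 q hq))
        hforb hddK
      have hany : polys.any
          (fun ab => PySem.Int.mod ab.1 p == 0 && PySem.Int.mod ab.2 p == 0) = false := by
        rw [List.any_eq_false]
        intro ab hab
        simp only [Bool.and_eq_true, beq_iff_eq, not_and]
        intro ha hb
        exact hndd ab hab ⟨(PySem.Int.mod_eq_zero_iff_dvd ab.1 p).mp ha,
          (PySem.Int.mod_eq_zero_iff_dvd ab.2 p).mp hb⟩
      constructor
      · rw [aLoop, hforbp, hinv]
        exact hih.1
      · rw [tablesLoop, if_neg (by rw [hany]; exact fun h => Bool.noConfusion h), hih.2]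

-- ===== VERDICT (by name: the statement is the Claim_ definition above) =====
theorem build_wheel_residues_spec : Claim_equal_build_wheel_residues := by
  intro polys primes _ hpre
  unfold Spec_build_wheel_residues
  unfold Pre_build_wheel_residues at hpre
  rcases hpre with ⟨hgood, hpw⟩ | ⟨k, hk, hgood, hpw, _, j, hj, hdd, hpref⟩
  · -- full-processing branch
    have hrel : List.Forall₂
        (fun r s => 0 ≤ r ∧ r < 1 ∧ r = PySem.Int.mod s 1 ∧ ∀ q ∈ primes, q ∣ s)
        [0] [(0 : Int)] :=
      List.Forall₂.cons ⟨le_refl 0, by norm_num, by decide, fun q _ => dvd_zero q⟩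
        List.Forall₂.nil
    have h := grand polys primes 1 primes.prod [0] [0] (le_refl 1) hgood hpw
      (fun p _ => Int.gcd_one_left p) (by ring) hrel
    rcases h with ⟨hA, hB⟩ | ⟨ts, ss', hB, hS, hA⟩
    · unfold build_wheel_residues build_wheel_residues_alt
      rw [hA, hB]
    · unfold build_wheel_residues build_wheel_residues_alt
      rw [hA, hB]
      have hfold : primes.foldl (· * ·) 1 = primes.prod := List.prod_eq_foldl.symm
      simp only [hfold, hS]
  · -- early-exit branch
    have hsplit : primes = primes.take k ++ primes.getD k 0 :: primes.drop (k + 1) := by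
      calc primes = primes.take k ++ primes.drop k := (List.take_append_drop _ _).symm
        _ = _ := by rw [List.drop_eq_getElem_cons hk, List.getD_eq_getElem primes 0 hk]
    have hforb : forbLoop polys (primes.getD k 0) PySem.Set.empty = some none :=
      forbLoop_exit (primes.getD k 0) polys j PySem.Set.empty hj hdd hpref
    have hddx : ∃ ab ∈ polys, primes.getD k 0 ∣ ab.1 ∧ primes.getD k 0 ∣ ab.2 := by
      refine ⟨polys.getD j (0, 0), ?_, hdd⟩
      rw [List.getD_eq_getElem polys (0, 0) hj]
      exact List.getElem_mem hj
    have h := exit_ind polys (primes.take k) 1 [0] (primes.getD k 0)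
      (primes.drop (k + 1)) (le_refl 1) hgood hpw (fun q _ => Int.gcd_one_left q)
      hforb hddx
    unfold build_wheel_residues build_wheel_residues_alt
    rw [hsplit, h.1, h.2]
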